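-- pv_equiv track=rewrite | github.com/katkalouckova/my_vocabulary | data_manipulation.py | delete_selected
-- ===== SOURCE A (Python) =====
-- def delete_selected(chosen_words: dict, required_words: str) -> str:
--     """
--     Deletes all required_words from chosen_words.
--     :rtype: str
--     :param chosen_words: contains words which the user wants to learn
--     :param required_words: words which the user wants to delete from chosen_words
--     :return: message about (un)successful deletion
--     """
--
--     # When there are no chosen_words, the user is informed
--     if not chosen_words:
--         return "There are no words in MY VOCABULARY."
--
--     # Variable required contains number of deleted words
--     required = 0
--
--     for required_word in required_words:
--
--         # It is searched by keys
--         # All required_words are deleted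
--         # After deletion of each word 1 point is added to variable required
--         if required_word in chosen_words:
--             del chosen_words[required_word]
--             required += 1
--
--     # When there are no marked words, the user is informed by a message
--     if required == 0:
--         return "There are no selected words to delete."
--
--     # When there is one word selected, the user is informed by a message
--     elif required == 1:
--         return "Selected word has been successfully deleted."
--
--     # When there are more words selected, the user is informed by a message
--     # The message contents also information about the count of deleted words
--     elif required > 1:
--         return f'{required} selected words have been successfully deleted.'
-- ===== SOURCE B (Python) =====
-- def delete_selected(chosen_words: dict, required_words: str) -> str:
--     """Deletes all required_words from chosen_words (in place, like the original).
--
--     Inverted traversal: instead of walking the string and probing the dict,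
--     walk the dict's keys and probe the character set. Keys are unique, so
--     no deduplication bookkeeping is needed; only single-character keys can
--     ever match a character of required_words, exactly as in the original.
--     """
--     if not chosen_words:
--         return "There are no words in MY VOCABULARY."
--     chars = set(required_words)
--     victims = [k for k in list(chosen_words) if k in chars]
--     for k in victims:
--         del chosen_words[k]
--     n = len(victims)
--     if n == 0:
--         return "There are no selected words to delete."
--     if n == 1:
--         return "Selected word has been successfully deleted."
--     return f'{n} selected words have been successfully deleted.'
-- ===== Notes on version B (the rewrite author's own statement) =====
-- stated objective: alternative
-- what changed: A walks the string required_words, probing and mutating the dict and keeping a running deletion counter; B inverts the traversal: it walks the dict's keys once, selecting those that lie in the character set of required_words (dict keys are unique, so A's delete-then-gone dedup bookkeeping disappears), deletes them, and branches on the victim count.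
import Mathlib
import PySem

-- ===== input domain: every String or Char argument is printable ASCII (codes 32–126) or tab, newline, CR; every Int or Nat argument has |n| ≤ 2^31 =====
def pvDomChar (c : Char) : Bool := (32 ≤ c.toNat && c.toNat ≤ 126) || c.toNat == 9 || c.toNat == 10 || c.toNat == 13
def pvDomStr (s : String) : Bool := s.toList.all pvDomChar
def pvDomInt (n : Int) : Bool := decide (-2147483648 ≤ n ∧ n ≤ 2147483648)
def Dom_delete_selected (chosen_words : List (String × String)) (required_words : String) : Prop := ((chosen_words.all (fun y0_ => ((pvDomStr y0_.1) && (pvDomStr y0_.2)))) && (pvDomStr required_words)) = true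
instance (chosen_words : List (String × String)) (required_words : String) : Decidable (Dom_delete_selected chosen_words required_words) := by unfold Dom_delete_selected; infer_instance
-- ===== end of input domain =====

-- B inverts A's traversal: A walks the string, probing/mutating the dict with a running counter;
-- B walks the dict's keys once, selecting those in the character set of required_words (keys are
-- unique, so A's delete-then-gone dedup bookkeeping disappears), then branches on the count.
-- Both Pythons mutate chosen_words in place identically; the theorems below are about the
-- RETURN value (the ports are pure).

-- ===== PORT A =====
def delete_selected (chosen_words : List (String × String)) (required_words : String) : String :=
  let d := PySem.Dict.ofList chosen_words
  if d.size = 0 then "There are no words in MY VOCABULARY."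
  else
    -- for required_word in required_words: if required_word in chosen_words: del …; required += 1
    let st := required_words.toList.foldl
      (fun (st : PySem.Dict String String × Int) c =>
        if st.1.contains (String.ofList [c]) then (st.1.erase (String.ofList [c]), st.2 + 1) else st)
      (d, 0)
    let required := st.2
    if required = 0 then "There are no selected words to delete."
    else if required = 1 then "Selected word has been successfully deleted."
    else if 1 < required then PySem.Int.toStr required ++ " selected words have been successfully deleted."
    else ""  -- Python falls off the end (returns None) here; unreachable since required ≥ 0

-- ===== PORT B =====
def delete_selected_alt (chosen_words : List (String × String)) (required_words : String) : String :=
  let d := PySem.Dict.ofList chosen_words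
  if d.size = 0 then "There are no words in MY VOCABULARY."
  else
    -- chars = set(required_words)
    let chars : PySem.Set String := PySem.Set.ofList (required_words.toList.map (fun c => String.ofList [c]))
    -- victims = [k for k in list(chosen_words) if k in chars]
    let victims := d.keys.filter (fun k => PySem.Set.contains chars k)
    -- the Python then deletes the victims from chosen_words in place (result unused here)
    let n : Int := victims.length
    if n = 0 then "There are no selected words to delete."
    else if n = 1 then "Selected word has been successfully deleted."
    else PySem.Int.toStr n ++ " selected words have been successfully deleted."

-- ===== PRECONDITION & SPEC =====
def Spec_delete_selected (chosen_words : List (String × String)) (required_words : String) (out : String) : Prop := out = delete_selected_alt chosen_words required_words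
instance (chosen_words : List (String × String)) (required_words : String) (out : String) : Decidable (Spec_delete_selected chosen_words required_words out) := by unfold Spec_delete_selected; infer_instance

-- ===== CLAIM (what is proved, stated in full; the proofs are below) =====
def Claim_equal_delete_selected : Prop := ∀ (chosen_words : List (String × String)) (required_words : String), Dom_delete_selected chosen_words required_words → Spec_delete_selected chosen_words required_words (delete_selected chosen_words required_words)

-- ===== LEMMAS AND PROOFS =====

-- membership after erase: the erased key is gone, every other key unaffected
theorem contains_erase_true (d : PySem.Dict String String) (k k' : String) :
    (d.erase k).contains k' = true ↔ (k' ≠ k ∧ d.contains k' = true) := by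
  simp only [PySem.Dict.contains, PySem.Dict.erase, List.any_filter, List.any_eq_true]
  constructor
  · rintro ⟨a, ha, hb⟩
    simp only [Bool.and_eq_true, Bool.not_eq_true', beq_eq_false_iff_ne, beq_iff_eq] at hb
    exact ⟨by rw [← hb.2]; exact hb.1, ⟨a, ha, by simp [hb.2]⟩⟩
  · rintro ⟨hne, a, ha, hb⟩
    refine ⟨a, ha, ?_⟩
    simp only [beq_iff_eq] at hb
    simp [hb, hne]

theorem contains_erase_eq (d : PySem.Dict String String) (k k' : String) :
    (d.erase k).contains k' = (!(k' == k) && d.contains k') := by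
  rw [Bool.eq_iff_iff, contains_erase_true]
  simp [Bool.and_eq_true, beq_eq_false_iff_ne]

-- a Set.ofList has no duplicates and the same members as its source list
theorem length_ofList_eq_card (xs : List String) :
    (PySem.Set.ofList xs).length = xs.toFinset.card := by
  have hn : (PySem.Set.ofList xs).Nodup := PySem.Set.nodup_ofList xs
  have hm : (PySem.Set.ofList xs).toFinset = xs.toFinset := by
    ext a; simp [List.mem_toFinset, PySem.Set.mem_ofList]
  rw [← hm, List.card_toFinset, hn.dedup]

-- A's delete-and-count loop counts exactly the distinct members of l that are keys of d
theorem count_loop_eq (l : List String) : ∀ (d : PySem.Dict String String) (r : Int),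
    (l.foldl (fun (st : PySem.Dict String String × Int) w =>
        if st.1.contains w then (st.1.erase w, st.2 + 1) else st) (d, r)).2
      = r + ((PySem.Set.ofList (l.filter (fun w => d.contains w))).length : Int) := by
  induction l with
  | nil => intro d r; simp [PySem.Set.ofList]
  | cons w l ih =>
      intro d r
      by_cases h : d.contains w = true
      · have hfil : l.filter (fun v => (d.erase w).contains v)
            = (l.filter (fun v => d.contains v)).filter (fun v => !(v == w)) := by
          rw [List.filter_filter]
          apply List.filter_congr
          intro v _
          cases hv : d.contains v <;> simp [contains_erase_eq, hv, Bool.and_comm]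
        have hcard : (PySem.Set.ofList (w :: l.filter (fun v => d.contains v))).length
            = (PySem.Set.ofList ((l.filter (fun v => d.contains v)).filter (fun v => !(v == w)))).length + 1 := by
          rw [length_ofList_eq_card, length_ofList_eq_card]
          set t := l.filter (fun v => d.contains v) with ht
          have h1 : (w :: t).toFinset = insert w t.toFinset := by simp
          have h2 : (t.filter (fun v => !(v == w))).toFinset = t.toFinset.erase w := by
            ext a; simp [List.mem_toFinset, Finset.mem_erase, and_comm]
          have h3 : insert w (t.toFinset.erase w) = insert w t.toFinset := by
            ext a; by_cases ha : a = w <;> simp [ha]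
          rw [h1, h2, ← h3, Finset.card_insert_of_notMem (Finset.notMem_erase w t.toFinset)]
        simp only [List.foldl_cons, h, if_true, List.filter_cons, ih, hfil]
        simp only [hcard]
        push_cast; ring
      · simp only [Bool.not_eq_true] at h
        simp only [List.foldl_cons, h, List.filter_cons, ih]
        simp

-- the two counts agree: distinct chars present as keys = keys present in the char set
theorem counts_agree (d : PySem.Dict String String) (cs : List String) (hnd : d.keys.Nodup) :
    (PySem.Set.ofList (cs.filter (fun w => d.contains w))).length
      = (d.keys.filter (fun k => PySem.Set.contains (PySem.Set.ofList cs) k)).length := by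
  rw [length_ofList_eq_card]
  have hnd' : (d.keys.filter (fun k => PySem.Set.contains (PySem.Set.ofList cs) k)).Nodup :=
    hnd.filter _
  rw [← hnd'.dedup, ← List.card_toFinset]
  congr 1
  ext a
  simp only [List.mem_toFinset, List.mem_filter]
  constructor
  · rintro ⟨ha, hc⟩
    refine ⟨by simpa [PySem.Dict.contains_eq_decide_mem_keys] using hc, ?_⟩
    simp [PySem.Set.contains, PySem.Set.mem_ofList, ha]
  · rintro ⟨hk, hc⟩
    have : a ∈ cs := by
      have := of_decide_eq_true (by simpa [PySem.Set.contains] using hc)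
      simpa [PySem.Set.mem_ofList] using this
    exact ⟨this, by simp [PySem.Dict.contains_eq_decide_mem_keys, hk]⟩

-- ===== VERDICT (by name: the statement is the Claim_ definition above) =====
theorem delete_selected_spec : Claim_equal_delete_selected := by
  intro chosen_words required_words _
  unfold Spec_delete_selected delete_selected delete_selected_alt
  set d := PySem.Dict.ofList chosen_words with hd
  by_cases hz : d.size = 0
  · simp [hz]
  · simp only [hz, if_false]
    have hfold : (required_words.toList.foldl
        (fun (st : PySem.Dict String String × Int) c =>
          if st.1.contains (String.ofList [c]) then (st.1.erase (String.ofList [c]), st.2 + 1) else st)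
        (d, 0)).2
        = ((PySem.Set.ofList ((required_words.toList.map (fun c => String.ofList [c])).filter
            (fun w => d.contains w))).length : Int) := by
      have h := count_loop_eq (required_words.toList.map (fun c => String.ofList [c])) d 0
      rw [List.foldl_map] at h
      omega
    have hnd : d.keys.Nodup := PySem.Dict.nodup_keys_ofList chosen_words
    rw [hfold, counts_agree d _ hnd]
    set n : Nat := (d.keys.filter (fun k =>
        PySem.Set.contains (PySem.Set.ofList (required_words.toList.map (fun c => String.ofList [c]))) k)).length with hn
    by_cases h0 : (n : Int) = 0
    · simp [h0]
    · by_cases h1 : (n : Int) = 1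
      · simp [h1]
      · have hgt : (1 : Int) < (n : Int) := by omega
        simp [h1, hgt]
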